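-- pv_equiv track=rewrite | github.com/Kim-Minhee/Baekjoon | 백준/Bronze/2999. 비밀 이메일/비밀 이메일.py | findRC
-- ===== SOURCE A (Python) =====
-- def findRC(n):
--   y = list()
--   for i in range(1, n+1):
--     if n%i==0:
--       y.append(i)
--   if len(y)%2==0:
--     r = y[len(y)//2-1]
--     c = y[len(y)//2]
--   else:
--     r = y[len(y)//2]
--     c = y[len(y)//2]
--   return r, c
-- ===== SOURCE B (Python) =====
-- import math
--
-- def findRC(n):
--     # scan only up to isqrt(n): the middle divisor pair is (largest divisor <= sqrt(n), n // it)
--     r = 1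
--     for i in range(1, math.isqrt(n) + 1):
--         if n % i == 0:
--             r = i
--     return r, n // r
-- ===== Notes on version B (the rewrite author's own statement) =====
-- stated objective: faster
-- what changed: Instead of collecting all divisors of n in a full 1..n scan and indexing the middle of the list, B scans only 1..isqrt(n) keeping the largest divisor r found, and returns (r, n // r), which is exactly the middle divisor pair.
-- outside the precondition, e.g. on findRC(0): A raises IndexError, B returns (1, 0)
import Mathlib
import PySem

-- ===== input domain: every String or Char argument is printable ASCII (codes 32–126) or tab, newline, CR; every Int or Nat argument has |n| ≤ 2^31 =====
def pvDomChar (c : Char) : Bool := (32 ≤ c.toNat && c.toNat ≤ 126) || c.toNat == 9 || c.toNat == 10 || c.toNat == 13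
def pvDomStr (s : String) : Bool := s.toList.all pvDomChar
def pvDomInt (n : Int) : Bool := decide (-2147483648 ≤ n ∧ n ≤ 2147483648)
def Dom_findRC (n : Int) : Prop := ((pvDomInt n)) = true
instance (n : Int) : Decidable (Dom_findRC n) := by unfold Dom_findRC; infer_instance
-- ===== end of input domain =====

-- B replaces A's full 1..n divisor scan (collect all divisors, index the middle) by a 1..isqrt(n)
-- scan keeping the largest divisor r found, returning (r, n // r): the same middle divisor pair.

-- ===== PORT A =====
def findRC (n : Int) : List Int :=
  let y := (PySem.List.pyRange 1 (n + 1) 1).foldl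
      (fun acc i => if PySem.Int.mod n i = 0 then acc ++ [i] else acc) []
  if PySem.Int.mod (y.length : Int) 2 = 0 then
    let r := PySem.List.pyGetD y (PySem.Int.floordiv (y.length : Int) 2 - 1) 0
    let c := PySem.List.pyGetD y (PySem.Int.floordiv (y.length : Int) 2) 0
    [r, c]
  else
    let r := PySem.List.pyGetD y (PySem.Int.floordiv (y.length : Int) 2) 0
    let c := PySem.List.pyGetD y (PySem.Int.floordiv (y.length : Int) 2) 0
    [r, c]

-- ===== PORT B =====
-- math.isqrt(n) is ported as Nat.sqrt n.toNat (exact for n ≥ 0; Python raises ValueError for n < 0, outside Pre_)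
def findRC_alt (n : Int) : List Int :=
  let r := (PySem.List.pyRange 1 (((Nat.sqrt n.toNat : Nat) : Int) + 1) 1).foldl
      (fun r i => if PySem.Int.mod n i = 0 then i else r) 1
  [r, PySem.Int.floordiv n r]

-- ===== PRECONDITION & SPEC =====
-- Pre_ excludes n ≤ 0: A raises IndexError there (the divisor list is empty, y[-1] on []); B raises ValueError for n < 0 and returns (1, 0) at n = 0.
def Pre_findRC (n : Int) : Prop := 1 ≤ n
instance (n : Int) : Decidable (Pre_findRC n) := by unfold Pre_findRC; infer_instance
def pvWitness_findRC : Int := 12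

def Spec_findRC (n : Int) (out : List Int) : Prop := out = findRC_alt n
instance (n : Int) (out : List Int) : Decidable (Spec_findRC n out) := by unfold Spec_findRC; infer_instance

-- ===== CLAIM (what is proved, stated in full; the proofs are below) =====
def Claim_equal_findRC : Prop := ∀ (n : Int), Dom_findRC n → Pre_findRC n → Spec_findRC n (findRC n)

-- ===== LEMMAS AND PROOFS =====

-- the increasing list of divisors of m (what A's loop collects, on the Nat side)
def pvDivL (m : Nat) : List Nat := (List.range' 1 m).filter (fun i => m % i == 0)

lemma pvMem_divL {m x : Nat} (hm : 1 ≤ m) : x ∈ pvDivL m ↔ x ∣ m := by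
  unfold pvDivL
  simp only [List.mem_filter, List.mem_range'_1, beq_iff_eq]
  constructor
  · rintro ⟨_, h⟩; exact Nat.dvd_of_mod_eq_zero h
  · intro h
    have hx : 0 < x := Nat.pos_of_dvd_of_pos h hm
    have hxm : x ≤ m := Nat.le_of_dvd hm h
    exact ⟨⟨hx, by omega⟩, Nat.dvd_iff_mod_eq_zero.mp h⟩

lemma pvDivL_pairwise (m : Nat) : (pvDivL m).Pairwise (· < ·) := by
  exact (List.pairwise_lt_range' 1).filter _

-- the divisor involution d ↦ m / d reverses the divisor list
lemma pvDivL_map_div (m : Nat) (hm : 1 ≤ m) :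
    (pvDivL m).map (fun d => m / d) = (pvDivL m).reverse := by
  have hpw : (pvDivL m).Pairwise (· < ·) := pvDivL_pairwise m
  have hmap : ((pvDivL m).map (fun d => m / d)).Pairwise (· > ·) := by
    rw [List.pairwise_map]
    refine hpw.imp_of_mem ?_
    intro a b ha hb hab
    have hda : a ∣ m := (pvMem_divL hm).mp ha
    have hdb : b ∣ m := (pvMem_divL hm).mp hb
    have ha0 : 0 < a := Nat.pos_of_dvd_of_pos hda hm
    have hb0 : 0 < b := Nat.pos_of_dvd_of_pos hdb hm
    have h1 : m / b * b = m := Nat.div_mul_cancel hdb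
    have h2 : m / a * a = m := Nat.div_mul_cancel hda
    have hb' : 0 < m / b := Nat.div_pos (Nat.le_of_dvd hm hdb) hb0
    have hstep : m / b * a < m / a * a := by
      have : m / b * a < m / b * b := Nat.mul_lt_mul_of_le_of_lt (le_refl _) hab hb'
      omega
    exact Nat.lt_of_mul_lt_mul_right hstep
  have hrev : ((pvDivL m).reverse).Pairwise (· > ·) := by
    simpa [List.pairwise_reverse] using hpw
  have hnd : (pvDivL m).Nodup := hpw.imp (fun h => Nat.ne_of_lt h)
  have hnd1 : ((pvDivL m).map (fun d => m / d)).Nodup :=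
    hmap.imp (fun h => Nat.ne_of_gt h)
  have hperm : ((pvDivL m).map (fun d => m / d)).Perm ((pvDivL m).reverse) := by
    rw [List.perm_ext_iff_of_nodup hnd1 (by simpa using hnd)]
    intro x
    simp only [List.mem_reverse, List.mem_map]
    constructor
    · rintro ⟨d, hd, rfl⟩
      exact (pvMem_divL hm).mpr (Nat.div_dvd_of_dvd ((pvMem_divL hm).mp hd))
    · intro hx
      have hxd : x ∣ m := (pvMem_divL hm).mp hx
      have hx0 : 0 < x := Nat.pos_of_dvd_of_pos hxd hm
      exact ⟨m / x, (pvMem_divL hm).mpr (Nat.div_dvd_of_dvd hxd), Nat.div_div_self hxd (by omega)⟩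
  exact hperm.eq_of_pairwise (fun a b _ _ h1 h2 => by omega) hmap hrev

-- index pairing: D[k-1-j] = m / D[j]
lemma pvPairing (m : Nat) (hm : 1 ≤ m) (j : Nat) (hj : j < (pvDivL m).length) :
    (pvDivL m)[(pvDivL m).length - 1 - j]'(by omega) = m / (pvDivL m)[j] := by
  have h := pvDivL_map_div m hm
  have h2 := congrArg (fun l => l[j]?) h
  simp only [List.getElem?_map] at h2
  rw [List.getElem?_reverse (by simpa using hj)] at h2
  rw [List.getElem?_eq_getElem hj, List.getElem?_eq_getElem (by omega)] at h2
  simpa using h2.symm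

lemma pvDivL_ne_nil (m : Nat) (hm : 1 ≤ m) : pvDivL m ≠ [] := by
  have : 1 ∈ pvDivL m := (pvMem_divL hm).mpr (one_dvd m)
  exact List.ne_nil_of_mem this

-- a filter (· ≤ s) of a list equals its prefix when indices split at t
lemma pvFilter_le_eq_take (D : List Nat) (s t : Nat) (ht : t ≤ D.length)
    (h1 : ∀ i (h : i < t), D[i]'(by omega) ≤ s)
    (h2 : ∀ i (h : i < D.length), t ≤ i → s < D[i]) :
    D.filter (fun x => decide (x ≤ s)) = D.take t := by
  conv_lhs => rw [← List.take_append_drop t D]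
  rw [List.filter_append]
  have hA : (D.take t).filter (fun x => decide (x ≤ s)) = D.take t := by
    rw [List.filter_eq_self]
    intro x hx
    obtain ⟨i, hi, hx'⟩ := List.mem_iff_getElem.mp hx
    have hi' : i < t := by simpa using lt_of_lt_of_le hi (by simp)
    have hx2 : x = D[i]'(by omega) := by rw [← hx']; simp [List.getElem_take]
    simpa [hx2] using h1 i hi'
  have hB : (D.drop t).filter (fun x => decide (x ≤ s)) = [] := by
    rw [List.filter_eq_nil_iff]
    intro x hx
    obtain ⟨i, hi, hx'⟩ := List.mem_iff_getElem.mp hx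
    have hi' : t + i < D.length := by simp at hi; omega
    have hx2 : x = D[t + i]'(hi') := by rw [← hx']; simp [List.getElem_drop]
    simpa [hx2] using h2 (t + i) hi' (by omega)
  rw [hA, hB, List.append_nil]

-- the filtered small range is the prefix-filter of the divisor list
lemma pvRange'_filter_le (m s : Nat) (hs : s ≤ m) :
    (pvDivL m).filter (fun x => decide (x ≤ s)) =
      (List.range' 1 s).filter (fun i => m % i == 0) := by
  unfold pvDivL
  rw [List.filter_comm]
  congr 1
  have hsplit : List.range' 1 m = List.range' 1 s ++ List.range' (1 + s) (m - s) := by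
    rw [List.range'_append_1]
    congr 1
    omega
  rw [hsplit, List.filter_append]
  have h1 : (List.range' 1 s).filter (fun x => decide (x ≤ s)) = List.range' 1 s := by
    rw [List.filter_eq_self]
    intro x hx
    simp only [List.mem_range'_1] at hx
    simpa using by omega
  have h2 : (List.range' (1 + s) (m - s)).filter (fun x => decide (x ≤ s)) = [] := by
    rw [List.filter_eq_nil_iff]
    intro x hx
    simp only [List.mem_range'_1] at hx
    simpa using by omega
  rw [h1, h2, List.append_nil]

-- bridge: the Int filtered range is the cast of the Nat one
lemma pvBridge (m b : Nat) :
    (PySem.List.pyRange 1 ((b : Int) + 1) 1).filter (fun x => decide (PySem.Int.mod (m : Int) x = 0))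
      = ((List.range' 1 b).filter (fun i => m % i == 0)).map (Nat.cast : Nat → Int) := by
  induction b with
  | zero => simp
  | succ b ih =>
    have hcast : ((b + 1 : Nat) : Int) + 1 = ((b : Int) + 1) + 1 := by push_cast; ring
    rw [hcast, PySem.List.pyRange_one_succ_right (by omega), List.range'_concat,
      List.filter_append, List.filter_append, List.map_append, ih]
    congr 1
    have hmod : PySem.Int.mod (m : Int) ((b : Int) + 1) = ((m % (b + 1) : Nat) : Int) := by
      have h1 : (b : Int) + 1 = ((b + 1 : Nat) : Int) := by push_cast; ring
      rw [h1, PySem.Int.mod_natCast]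
    by_cases h : m % (b + 1) = 0
    · simp only [show 1 + 1 * b = b + 1 by omega]
      simp [h]
      exact_mod_cast Int.natCast_dvd_natCast.mpr (Nat.dvd_of_mod_eq_zero h)
    · simp only [show 1 + 1 * b = b + 1 by omega]
      simp [h]
      intro hdvd
      exact h (Nat.dvd_iff_mod_eq_zero.mp (Int.natCast_dvd_natCast.mp (by exact_mod_cast hdvd)))

-- the central Nat fact: B's r is D[(k-1)/2]
lemma pvR_char (m : Nat) (hm : 1 ≤ m) :
    ((List.range' 1 (Nat.sqrt m)).filter (fun i => m % i == 0)).getLastD 1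
      = (pvDivL m).getD (((pvDivL m).length - 1) / 2) 0 := by
  have hne := pvDivL_ne_nil m hm
  have hk1 : 1 ≤ (pvDivL m).length := by
    cases h : pvDivL m with
    | nil => exact absurd h hne
    | cons a l => simp
  set D := pvDivL m with hD
  set k := D.length with hk
  set j := (k - 1) / 2 with hj
  have hjk : j < k := by omega
  have hk2 : k / 2 < k := by omega
  -- monotonicity of D from pairwise (· < ·)
  have hpw := pvDivL_pairwise m
  rw [← hD] at hpw
  have hmono : ∀ i₁ i₂ (h₂ : i₂ < k) (hle : i₁ ≤ i₂), D[i₁]'(by omega) ≤ D[i₂]'h₂ := by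
    intro i₁ i₂ h₂ hle
    rcases Nat.lt_or_ge i₁ i₂ with h | h
    · exact le_of_lt (List.pairwise_iff_getElem.mp hpw i₁ i₂ (by omega) h₂ h)
    · have : i₁ = i₂ := by omega
      subst this; rfl
  have hstrict : ∀ i₁ i₂ (h₂ : i₂ < k) (h : i₁ < i₂), D[i₁]'(by omega) < D[i₂]'h₂ :=
    fun i₁ i₂ h₂ h => List.pairwise_iff_getElem.mp hpw i₁ i₂ (by omega) h₂ h
  -- the pairing at the middle
  have hpair : D[k / 2]'hk2 = m / D[j]'hjk := by
    have := pvPairing m hm j (by rw [← hD, ← hk]; exact hjk)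
    simpa [← hD, ← hk, show k - 1 - j = k / 2 by omega] using this
  have hjd : D[j]'hjk ∣ m := (pvMem_divL hm).mp (List.getElem_mem _)
  have hj0 : 0 < D[j]'hjk := Nat.pos_of_dvd_of_pos hjd hm
  have hmul : D[k / 2]'hk2 * D[j]'hjk = m := by rw [hpair]; exact Nat.div_mul_cancel hjd
  -- D[j] ≤ sqrt m
  have hsq_le : D[j]'hjk * D[j]'hjk ≤ m := by
    calc D[j]'hjk * D[j]'hjk ≤ D[k / 2]'hk2 * D[j]'hjk :=
          Nat.mul_le_mul_right _ (hmono j (k / 2) hk2 (by omega))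
      _ = m := hmul
  have hle : ∀ i (h : i < j + 1), D[i]'(by omega) ≤ Nat.sqrt m := by
    intro i h
    exact le_trans (hmono i j hjk (by omega)) (Nat.le_sqrt.mpr hsq_le)
  -- indices past j exceed sqrt m
  have hgt : ∀ i (h : i < k), j + 1 ≤ i → Nat.sqrt m < D[i]'h := by
    intro i h hi
    have hik : k / 2 ≤ i := by omega
    have h1 : D[k / 2]'hk2 ≤ D[i]'h := hmono (k / 2) i h hik
    have h2 : D[j]'hjk < D[i]'h := hstrict j i h (by omega)
    have h0 : 0 < D[i]'h := by omega
    have : m < D[i]'h * D[i]'h := by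
      calc m = D[k / 2]'hk2 * D[j]'hjk := hmul.symm
        _ < D[i]'h * D[i]'h := Nat.mul_lt_mul_of_le_of_lt h1 h2 h0
    exact Nat.sqrt_lt.mpr this
  rw [← pvRange'_filter_le m (Nat.sqrt m) (Nat.sqrt_le_self m), ← hD,
    pvFilter_le_eq_take D (Nat.sqrt m) (j + 1) (by omega) hle hgt]
  rw [List.getLastD_eq_getLast?, List.getLast?_eq_getElem?]
  simp only [List.length_take]
  rw [List.getElem?_take]
  rw [Nat.min_eq_left (show j + 1 ≤ D.length from by omega), Nat.add_sub_cancel]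
  simp [List.getElem?_eq_getElem hjk]

lemma pvFoldl_last {α : Type} (l : List α) (a : α) :
    l.foldl (fun _ x => x) a = l.getLastD a := by
  induction l using List.reverseRecOn with
  | nil => rfl
  | append_singleton xs x ih => simp [List.foldl_append]

theorem findRC_spec : Claim_equal_findRC := by
  intro n _ hn
  unfold Spec_findRC findRC findRC_alt
  have hn' : 1 ≤ n := hn
  obtain ⟨m, rfl⟩ : ∃ m : Nat, n = (m : Int) := ⟨n.toNat, by omega⟩
  have hm : 1 ≤ m := by exact_mod_cast hn'
  have hfold : (List.range' 1 m).filter (fun i => m % i == 0) = pvDivL m := rfl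
  -- A's loop collects the cast divisor list
  simp only []
  rw [PySem.List.foldl_append_ite_eq_filter, List.nil_append]
  rw [pvBridge m m, hfold]
  -- B's loop keeps the last divisor ≤ isqrt
  rw [PySem.List.foldl_ite_eq_foldl_filter, Int.toNat_natCast,
    pvBridge m (Nat.sqrt m), pvFoldl_last]
  set D := pvDivL m with hD
  set k := D.length with hk
  have hk1 : 1 ≤ k := by
    have hne := pvDivL_ne_nil m hm
    rw [← hD] at hne
    cases h : D with
    | nil => exact absurd h hne
    | cons a l => rw [hk, h]; simp
  set j := (k - 1) / 2 with hj
  have hjk : j < k := by omega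
  have hk2 : k / 2 < k := by omega
  -- B's r equals D[(k-1)/2]
  have hr : ((List.range' 1 (Nat.sqrt m)).filter (fun i => m % i == 0)).getLastD 1
      = D.getD j 0 := pvR_char m hm
  -- the pairing: m / D[j] = D[k/2]
  have hlenD : (pvDivL m).length = k := by rw [← hD, ← hk]
  have hpairD : m / D.getD j 0 = D.getD (k / 2) 0 := by
    have hjk' : j < (pvDivL m).length := by omega
    have hp := pvPairing m hm j hjk'
    have hq : (pvDivL m)[(pvDivL m).length - 1 - j]? = some (m / (pvDivL m)[j]'hjk') := by
      rw [List.getElem?_eq_getElem (by omega)]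
      exact congrArg some hp
    rw [show (pvDivL m).length - 1 - j = k / 2 from by omega] at hq
    rw [List.getElem?_eq_getElem (by omega : k / 2 < (pvDivL m).length)] at hq
    have hval := Option.some.inj hq
    rw [List.getD_eq_getElem D 0 hjk, List.getD_eq_getElem D 0 hk2]
    exact hval.symm
  -- getLastD through the map
  have hlastmap : ((((List.range' 1 (Nat.sqrt m)).filter (fun i => m % i == 0))).map
      (Nat.cast : Nat → Int)).getLastD 1
      = ((((List.range' 1 (Nat.sqrt m)).filter (fun i => m % i == 0))).getLastD 1 : Nat) := by
    rw [List.getLastD_eq_getLast?, List.getLastD_eq_getLast?, List.getLast?_map]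
    cases ((List.range' 1 (Nat.sqrt m)).filter (fun i => m % i == 0)).getLast? <;> simp
  rw [hlastmap, hr]
  -- lengths and the branch condition
  have hlen : ((D.map (Nat.cast : Nat → Int)).length : Int) = (k : Int) := by
    rw [List.length_map, hk]
  rw [hlen]
  have hmod2 : PySem.Int.mod (k : Int) 2 = ((k % 2 : Nat) : Int) := by
    exact_mod_cast PySem.Int.mod_natCast k 2
  have hfd : PySem.Int.floordiv (k : Int) 2 = ((k / 2 : Nat) : Int) := by
    exact_mod_cast PySem.Int.floordiv_natCast k 2
  have hgetD : ∀ i : Nat, i < k → PySem.List.pyGetD (D.map (Nat.cast : Nat → Int)) ((i : Nat) : Int) 0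
      = ((D.getD i 0 : Nat) : Int) := by
    intro i hi
    rw [PySem.List.pyGetD_natCast]
    rw [List.getD_eq_getElem _ 0 (by rw [List.length_map, ← hk]; exact hi),
      List.getD_eq_getElem D 0 hi, List.getElem_map]
  have hc : PySem.Int.floordiv ((m : Nat) : Int) ((D.getD j 0 : Nat) : Int)
      = ((m / D.getD j 0 : Nat) : Int) := PySem.Int.floordiv_natCast m (D.getD j 0)
  by_cases hpar : k % 2 = 0
  · -- even number of divisors
    have hk2' : 1 ≤ k / 2 := by omega
    rw [if_pos (by rw [hmod2, hpar]; rfl)]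
    rw [hfd, show ((k / 2 : Nat) : Int) - 1 = (((k / 2 - 1 : Nat)) : Int) from by omega]
    rw [hgetD (k / 2 - 1) (by omega), hgetD (k / 2) hk2, hc, hpairD]
    rw [show k / 2 - 1 = j from by omega]
  · -- odd number of divisors
    rw [if_neg (by rw [hmod2]; intro hq; exact hpar (by exact_mod_cast hq))]
    rw [hfd, hgetD (k / 2) hk2, hc, hpairD]
    rw [show k / 2 = j from by omega]
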